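-- pv_equiv track=rewrite | github.com/petar-popovic-bg/Jerteh | Text/text.py | asc_to_cyr
-- ===== SOURCE A (Python) =====
-- def asc_to_cyr(text):
--     """
--     Converts ASCII text to sr-cyrillic script.
--
--     :param text: string
--     :return: string
--     """
--     dic = {
--         'LX': 'Љ',
--         'NX': 'Њ',
--         'DY': 'Џ',
--         'Lx': 'Љ',
--         'Nx': 'Њ',
--         'Dy': 'Џ',
--         'Dx': 'Ђ',
--         'Zx': 'Ж',
--         'Cx': 'Ћ',
--         'Cy': 'Ч',
--         'Sx': 'Ш',
--         'A': 'А',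
--         'B': 'Б',
--         'V': 'В',
--         'G': 'Г',
--         'D': 'Д',
--         'E': 'Е',
--         'Z': 'З',
--         'I': 'И',
--         'J': 'Ј',
--         'K': 'К',
--         'L': 'Л',
--         'M': 'М',
--         'N': 'Н',
--         'O': 'О',
--         'P': 'П',
--         'R': 'Р',
--         'S': 'С',
--         'T': 'Т',
--         'U': 'У',
--         'F': 'Ф',
--         'H': 'Х',
--         'C': 'Ц',
--         'lx': 'љ',
--         'nx': 'њ',
--         'dy': 'џ',
--         'dx': 'ђ',
--         'zx': 'ж',
--         'cx': 'ћ',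
--         'cy': 'ч',
--         'sx': 'ш',
--         'a': 'а',
--         'b': 'б',
--         'v': 'в',
--         'g': 'г',
--         'd': 'д',
--         'e': 'е',
--         'z': 'з',
--         'i': 'и',
--         'j': 'ј',
--         'k': 'к',
--         'l': 'л',
--         'm': 'м',
--         'n': 'н',
--         'o': 'о',
--         'p': 'п',
--         'r': 'р',
--         's': 'с',
--         't': 'т',
--         'u': 'у',
--         'f': 'ф',
--         'h': 'х',
--         'c': 'ц'
--     }
--     for key in dic.keys():
--         text = text.replace(key, dic[key])
--     return text
-- ===== SOURCE B (Python) =====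
-- def asc_to_cyr(text):
--     """
--     Converts ASCII text to sr-cyrillic script.
--
--     :param text: string
--     :return: string
--     """
--     pairs = [
--         ('LX', 'Љ'), ('NX', 'Њ'), ('DY', 'Џ'), ('Lx', 'Љ'), ('Nx', 'Њ'),
--         ('Dy', 'Џ'), ('Dx', 'Ђ'), ('Zx', 'Ж'), ('Cx', 'Ћ'), ('Cy', 'Ч'),
--         ('Sx', 'Ш'),
--         ('A', 'А'), ('B', 'Б'), ('V', 'В'), ('G', 'Г'), ('D', 'Д'),
--         ('E', 'Е'), ('Z', 'З'), ('I', 'И'), ('J', 'Ј'), ('K', 'К'),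
--         ('L', 'Л'), ('M', 'М'), ('N', 'Н'), ('O', 'О'), ('P', 'П'),
--         ('R', 'Р'), ('S', 'С'), ('T', 'Т'), ('U', 'У'), ('F', 'Ф'),
--         ('H', 'Х'), ('C', 'Ц'),
--         ('lx', 'љ'), ('nx', 'њ'), ('dy', 'џ'), ('dx', 'ђ'), ('zx', 'ж'),
--         ('cx', 'ћ'), ('cy', 'ч'), ('sx', 'ш'),
--         ('a', 'а'), ('b', 'б'), ('v', 'в'), ('g', 'г'), ('d', 'д'),
--         ('e', 'е'), ('z', 'з'), ('i', 'и'), ('j', 'ј'), ('k', 'к'),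
--         ('l', 'л'), ('m', 'м'), ('n', 'н'), ('o', 'о'), ('p', 'п'),
--         ('r', 'р'), ('s', 'с'), ('t', 'т'), ('u', 'у'), ('f', 'ф'),
--         ('h', 'х'), ('c', 'ц')
--     ]
--     out = []
--     i = 0
--     n = len(text)
--     while i < n:
--         for k, v in pairs:
--             if text.startswith(k, i):
--                 out.append(v)
--                 i += len(k)
--                 break
--         else:
--             out.append(text[i])
--             i += 1
--     return ''.join(out)
-- ===== Notes on version B (the rewrite author's own statement) =====
-- stated objective: alternative
-- what changed: A rewrites the whole string 66 times, once per dictionary key via str.replace; B makes a single left-to-right scan that at each position emits the value of the first matching key (digraphs before single letters, in the same priority order) and advances past it.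
import Mathlib
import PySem

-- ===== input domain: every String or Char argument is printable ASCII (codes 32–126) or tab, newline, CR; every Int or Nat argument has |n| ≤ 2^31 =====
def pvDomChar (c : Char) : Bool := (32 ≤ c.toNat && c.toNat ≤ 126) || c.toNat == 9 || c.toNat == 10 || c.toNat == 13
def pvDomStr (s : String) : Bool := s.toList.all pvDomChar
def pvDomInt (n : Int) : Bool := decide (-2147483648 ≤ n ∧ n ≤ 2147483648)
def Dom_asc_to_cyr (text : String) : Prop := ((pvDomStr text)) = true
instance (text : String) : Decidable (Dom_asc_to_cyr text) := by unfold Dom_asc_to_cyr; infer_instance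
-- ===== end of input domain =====

-- B replaces A's 66 successive full-string str.replace passes by a single left-to-right scan
-- that emits the first matching key's value at each position (alternative decomposition; no speed claim).

-- ===== PORT A =====
-- A's literal dict (insertion order) and the loop `for key in dic.keys(): text = text.replace(key, dic[key])`
def ascDicPairs : List (String × String) := [("LX","Љ"), ("NX","Њ"), ("DY","Џ"), ("Lx","Љ"), ("Nx","Њ"), ("Dy","Џ"), ("Dx","Ђ"), ("Zx","Ж"), ("Cx","Ћ"), ("Cy","Ч"), ("Sx","Ш"), ("A","А"), ("B","Б"), ("V","В"), ("G","Г"), ("D","Д"), ("E","Е"), ("Z","З"), ("I","И"), ("J","Ј"), ("K","К"), ("L","Л"), ("M","М"), ("N","Н"), ("O","О"), ("P","П"), ("R","Р"), ("S","С"), ("T","Т"), ("U","У"), ("F","Ф"), ("H","Х"), ("C","Ц"), ("lx","љ"), ("nx","њ"), ("dy","џ"), ("dx","ђ"), ("zx","ж"), ("cx","ћ"), ("cy","ч"), ("sx","ш"), ("a","а"), ("b","б"), ("v","в"), ("g","г"), ("d","д"), ("e","е"), ("z","з"), ("i","и"), ("j","ј"), ("k","к"), ("l","л"), ("m","м"),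 ("n","н"), ("o","о"), ("p","п"), ("r","р"), ("s","с"), ("t","т"), ("u","у"), ("f","ф"), ("h","х"), ("c","ц")]

def ascDic : PySem.Dict String String := PySem.Dict.mk ascDicPairs

def asc_to_cyr (text : String) : String :=
  ascDic.keys.foldl (fun t key => PySem.Str.replace t key (ascDic.getD key "")) text

-- ===== PORT B =====
-- Source B's ordered pair table, as code-point lists (str -> List Char per the type convention)
def cyrPairs : List (List Char × List Char) := [(['L','X'], ['Љ']), (['N','X'], ['Њ']), (['D','Y'], ['Џ']), (['L','x'], ['Љ']), (['N','x'], ['Њ']), (['D','y'], ['Џ']), (['D','x'], ['Ђ']), (['Z','x'], ['Ж']), (['C','x'], ['Ћ']), (['C','y'], ['Ч']), (['S','x'], ['Ш']), (['A'], ['А']), (['B'], ['Б']), (['V'], ['В']), (['G'], ['Г']), (['D'], ['Д']), (['E'], ['Е']), (['Z'], ['З']), (['I'], ['И']), (['J'], ['Ј']), (['K'], ['К']), (['L'], ['Л']), (['M'], ['М']), (['N'], ['Н']), (['O'], ['О']), (['P'], ['П']), (['R'], ['Р']), (['S'], ['С']), (['T'], ['Т']), (['U'], ['У']), (['F'], ['Ф']),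 (['H'], ['Х']), (['C'], ['Ц']), (['l','x'], ['љ']), (['n','x'], ['њ']), (['d','y'], ['џ']), (['d','x'], ['ђ']), (['z','x'], ['ж']), (['c','x'], ['ћ']), (['c','y'], ['ч']), (['s','x'], ['ш']), (['a'], ['а']), (['b'], ['б']), (['v'], ['в']), (['g'], ['г']), (['d'], ['д']), (['e'], ['е']), (['z'], ['з']), (['i'], ['и']), (['j'], ['ј']), (['k'], ['к']), (['l'], ['л']), (['m'], ['м']), (['n'], ['н']), (['o'], ['о']), (['p'], ['п']), (['r'], ['р']), (['s'], ['с']), (['t'], ['т']), (['u'], ['у']), (['f'], ['ф']), (['h'], ['х']), (['c'], ['ц'])]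

-- Source B's while loop: at position i take the first pair whose key starts there, else copy the char
def ascScan : List Char → List Char
  | [] => []
  | c :: t =>
    match cyrPairs.find? (fun p => p.1.isPrefixOf (c :: t)) with
    | some p => p.2 ++ ascScan (t.drop (p.1.length - 1))
    | none => c :: ascScan t
termination_by cs => cs.length
decreasing_by
  · simp only [List.length_drop, List.length_cons]; omega
  · simp

def asc_to_cyr_alt (text : String) : String := String.ofList (ascScan text.toList)

-- ===== PRECONDITION & SPEC =====
def Spec_asc_to_cyr (text : String) (out : String) : Prop := out = asc_to_cyr_alt text
instance (text : String) (out : String) : Decidable (Spec_asc_to_cyr text out) := by unfold Spec_asc_to_cyr; infer_instance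

-- ===== CLAIM (what is proved, stated in full; the proofs are below) =====
def Claim_equal_asc_to_cyr : Prop := ∀ (text : String), Dom_asc_to_cyr text → Spec_asc_to_cyr text (asc_to_cyr text)

-- ===== LEMMAS AND PROOFS =====

-- one str.replace pass, written structurally (greedy left-to-right, as CPython scans)
def repPass (k v : List Char) : List Char → List Char
  | [] => []
  | c :: t => if k.isPrefixOf (c :: t) then v ++ repPass k v (t.drop (k.length - 1)) else c :: repPass k v t
termination_by s => s.length
decreasing_by
  · simp only [List.length_drop, List.length_cons]; omega
  · simp

lemma go_eq_rep (k v : List Char) (hk : k ≠ []) :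
    ∀ fuel l acc, l.length ≤ fuel →
      PySem.Chars.replace.go k v fuel l acc = acc.reverse ++ repPass k v l := by
  intro fuel
  induction fuel with
  | zero =>
    intro l acc hl
    have : l = [] := List.eq_nil_of_length_eq_zero (Nat.le_zero.mp hl)
    subst this
    simp [PySem.Chars.replace.go, repPass]
  | succ f ih =>
    intro l acc hl
    cases l with
    | nil => simp [PySem.Chars.replace.go, repPass]
    | cons c t =>
      rw [PySem.Chars.replace.go]
      by_cases hp : k.isPrefixOf (c :: t)
      · rw [if_pos hp]
        obtain ⟨a, k', rfl⟩ : ∃ a k', k = a :: k' := by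
          cases k with | nil => exact absurd rfl hk | cons a k' => exact ⟨a, k', rfl⟩
        have hlen : (List.drop (a :: k').length (c :: t)).length ≤ f := by
          simp only [List.length_drop, List.length_cons] at *
          omega
        rw [ih _ _ hlen]
        rw [repPass, if_pos hp]
        simp [List.drop_succ_cons]
      · rw [if_neg hp, ih t (c :: acc) (by simpa using Nat.lt_succ_iff.mp (by simpa using hl)), repPass, if_neg hp]
        simp

lemma replace_eq_rep (s k v : List Char) (hk : k ≠ []) :
    PySem.Chars.replace s k v = repPass k v s := by
  rw [PySem.Chars.replace, if_neg (by simpa using hk)]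
  simpa using go_eq_rep k v hk s.length s [] le_rfl

-- the 66 passes of A, composed in dict order, at the char-list level
def composeR (ks : List (List Char × List Char)) (s : List Char) : List Char :=
  ks.foldl (fun t p => repPass p.1 p.2 t) s

-- facts about the literal key table, checked once by the kernel
def sndChars : List Char := ['X', 'Y', 'x', 'y']

def pairOk (p : List Char × List Char) : Bool :=
  (decide (p.1.length = 1) || decide (p.1.length = 2)) &&
  decide (p.2.length = 1) &&
  p.2.all (fun w => decide (1024 ≤ w.toNat)) &&
  p.1.all (fun a => decide (a.toNat < 128)) &&
  ((p.1[1]?).all (fun b => sndChars.contains b)) &&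
  ((p.1.head?).all (fun e => !sndChars.contains e))

lemma facts_bool : cyrPairs.all pairOk = true := by rfl

lemma mem_ok {p : List Char × List Char} (hp : p ∈ cyrPairs) : pairOk p = true :=
  List.all_eq_true.mp facts_bool p hp

lemma key_len {p : List Char × List Char} (hp : p ∈ cyrPairs) :
    p.1.length = 1 ∨ p.1.length = 2 := by
  have h := mem_ok hp
  simp only [pairOk, Bool.and_eq_true, Bool.or_eq_true, decide_eq_true_eq] at h
  tauto

lemma key_ne_nil {p : List Char × List Char} (hp : p ∈ cyrPairs) : p.1 ≠ [] := by
  rcases key_len hp with h | h <;> (intro hnil; rw [hnil] at h; simp at h)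

lemma val_shape {p : List Char × List Char} (hp : p ∈ cyrPairs) :
    ∃ w, p.2 = [w] ∧ 1024 ≤ w.toNat := by
  have h := mem_ok hp
  simp only [pairOk, Bool.and_eq_true, Bool.or_eq_true, decide_eq_true_eq,
    List.all_eq_true] at h
  obtain ⟨⟨⟨⟨⟨-, h1⟩, hw⟩, -⟩, -⟩, -⟩ := h
  obtain ⟨w, hwl⟩ := List.length_eq_one_iff.mp h1
  exact ⟨w, hwl, by have := hw w (by rw [hwl]; simp); simpa using this⟩

lemma key_ascii {p : List Char × List Char} (hp : p ∈ cyrPairs) :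
    ∀ a ∈ p.1, a.toNat < 128 := by
  have h := mem_ok hp
  simp only [pairOk, Bool.and_eq_true, Bool.or_eq_true, decide_eq_true_eq,
    List.all_eq_true] at h
  intro a ha
  obtain ⟨⟨⟨⟨⟨-, -⟩, -⟩, hA⟩, -⟩, -⟩ := h
  simpa using hA a ha

lemma key_snd_snd {p : List Char × List Char} (hp : p ∈ cyrPairs) {a b : Char}
    (h2 : p.1 = [a, b]) : sndChars.contains b = true := by
  have h := mem_ok hp
  simp only [pairOk, Bool.and_eq_true] at h
  have := h.1.2
  rw [h2] at this
  simpa using this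

lemma key_head_not_snd {p : List Char × List Char} (hp : p ∈ cyrPairs) {e : Char}
    {r : List Char} (hh : p.1 = e :: r) : sndChars.contains e = false := by
  have h := mem_ok hp
  simp only [pairOk, Bool.and_eq_true] at h
  have := h.2
  rw [hh] at this
  simpa using this

-- single-pass skip / head lemmas
lemma repPass_skip (k v : List Char) (c : Char) (t : List Char) (h : ¬ k <+: (c :: t)) :
    repPass k v (c :: t) = c :: repPass k v t := by
  rw [repPass, if_neg (by simpa [List.isPrefixOf_iff_prefix] using h)]

lemma repPass_head (k : List Char) (w : Char) (t : List Char) :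
    (repPass k [w] t).head? = t.head? ∨ (repPass k [w] t).head? = some w := by
  cases t with
  | nil => left; simp [repPass]
  | cons c t =>
    rw [repPass]
    split_ifs with hp
    · right; simp
    · left; simp

lemma prefix_single_head {b : Char} {X : List Char} (h : [b] <+: X) : X.head? = some b := by
  cases X with
  | nil => simp at h
  | cons x xs => rw [List.cons_prefix_cons] at h; rw [h.1]; rfl

-- skipping one untouched character through a whole composition of passes
lemma compose_skip (ks : List (List Char × List Char)) (hks : ∀ p ∈ ks, p ∈ cyrPairs)
    (c : Char) (t : List Char) (h : ∀ p ∈ ks, ¬ p.1 <+: (c :: t)) :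
    composeR ks (c :: t) = c :: composeR ks t := by
  induction ks generalizing t with
  | nil => rfl
  | cons p ks ih =>
    have hpc : p ∈ cyrPairs := hks p (by simp)
    simp only [composeR, List.foldl_cons]
    rw [repPass_skip p.1 p.2 c t (h p (by simp))]
    have hnew : ∀ q ∈ ks, ¬ q.1 <+: (c :: repPass p.1 p.2 t) := by
      intro q hq hpre
      have hqc : q ∈ cyrPairs := hks q (by simp [hq])
      have hqorig : ¬ q.1 <+: (c :: t) := h q (by simp [hq])
      rcases key_len hqc with h1 | h2
      · obtain ⟨a, ha⟩ := List.length_eq_one_iff.mp h1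
        rw [ha] at hpre hqorig
        rw [List.cons_prefix_cons] at hpre
        exact hqorig (by rw [hpre.1]; simp)
      · obtain ⟨a, b, hab⟩ := List.length_eq_two.mp h2
        rw [hab] at hpre hqorig
        rw [List.cons_prefix_cons] at hpre
        obtain ⟨rfl, hb⟩ := hpre
        obtain ⟨w, hw, hwval⟩ := val_shape hpc
        rw [hw] at hb
        have hbhead : (repPass p.1 [w] t).head? = some b := prefix_single_head hb
        rcases repPass_head p.1 w t with hh | hh
        · rw [hh] at hbhead
          cases t with
          | nil => simp at hbhead
          | cons t0 t' =>
            apply hqorig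
            rw [List.cons_prefix_cons]
            simp only [List.head?, Option.some.injEq] at hbhead
            exact ⟨rfl, by rw [hbhead]; simp⟩
        · rw [hh] at hbhead
          simp only [Option.some.injEq] at hbhead
          have hbascii : b.toNat < 128 := key_ascii hqc b (by rw [hab]; simp)
          rw [hbhead] at hwval
          omega
    exact ih (fun q hq => hks q (by simp [hq])) (repPass p.1 p.2 t) hnew

lemma composeR_nil (ks : List (List Char × List Char)) : composeR ks [] = [] := by
  induction ks with
  | nil => rfl
  | cons p ks ih => simp only [composeR, List.foldl_cons]; rw [repPass]; exact ih

-- a value character (>= 0x400) matches no key: skip it through a composition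
lemma compose_skip_val (ks : List (List Char × List Char)) (hks : ∀ p ∈ ks, p ∈ cyrPairs)
    (w : Char) (hw : 1024 ≤ w.toNat) (t : List Char) :
    composeR ks (w :: t) = w :: composeR ks t := by
  apply compose_skip ks hks w t
  intro p hp hpre
  have hpc := hks p hp
  obtain ⟨e, r, he⟩ : ∃ e r, p.1 = e :: r := by
    cases hkey : p.1 with
    | nil => exact absurd hkey (key_ne_nil hpc)
    | cons e r => exact ⟨e, r, rfl⟩
  rw [he, List.cons_prefix_cons] at hpre
  have : e.toNat < 128 := key_ascii hpc e (by rw [he]; simp)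
  rw [hpre.1] at this
  omega

lemma ascScan_cons (c : Char) (t : List Char) :
    ascScan (c :: t) = match cyrPairs.find? (fun p => p.1.isPrefixOf (c :: t)) with
      | some p => p.2 ++ ascScan (t.drop (p.1.length - 1))
      | none => c :: ascScan t := by
  rw [ascScan]

lemma composeR_append (ks ks' : List (List Char × List Char)) (s : List Char) :
    composeR (ks ++ ks') s = composeR ks' (composeR ks s) := by
  simp [composeR, List.foldl_append]

-- the heart of the proof: the 66 composed passes act exactly like the one-pass scan
lemma compose_eq_scan : ∀ n : Nat, ∀ s : List Char, s.length ≤ n →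
    composeR cyrPairs s = ascScan s := by
  intro n
  induction n with
  | zero =>
    intro s hs
    have : s = [] := List.eq_nil_of_length_eq_zero (Nat.le_zero.mp hs)
    subst this
    rw [composeR_nil, ascScan]
  | succ n ih =>
    intro s hs
    cases s with
    | nil => rw [composeR_nil, ascScan]
    | cons c t =>
      cases hf : cyrPairs.find? (fun p => p.1.isPrefixOf (c :: t)) with
      | none =>
        have hnone : ∀ p ∈ cyrPairs, ¬ p.1 <+: (c :: t) := by
          intro p hp
          have := List.find?_eq_none.mp hf p hp
          simpa [List.isPrefixOf_iff_prefix] using this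
        calc composeR cyrPairs (c :: t) = c :: composeR cyrPairs t :=
              compose_skip cyrPairs (fun p hp => hp) c t hnone
          _ = c :: ascScan t := by
              rw [ih t (by simpa using Nat.lt_succ_iff.mp (by simpa using hs))]
          _ = ascScan (c :: t) := by rw [ascScan_cons, hf]
      | some p =>
        have hfs := List.find?_eq_some_iff_append.mp hf
        obtain ⟨hpred, as, bs, hsplit, hbefore⟩ := hfs
        have hpc : p ∈ cyrPairs := by rw [hsplit]; simp
        have hasmem : ∀ q ∈ as, q ∈ cyrPairs := by
          intro q hq; rw [hsplit]; simp [hq]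
        have hbsmem : ∀ q ∈ bs, q ∈ cyrPairs := by
          intro q hq; rw [hsplit]; simp [hq]
        have haspre : ∀ q ∈ as, ¬ q.1 <+: (c :: t) := by
          intro q hq
          have hb := hbefore q hq
          simp only [Bool.not_eq_true'] at hb
          simp [← List.isPrefixOf_iff_prefix, hb]
        have hppre : p.1 <+: (c :: t) := by
          simpa [List.isPrefixOf_iff_prefix] using hpred
        obtain ⟨w, hw, hwval⟩ := val_shape hpc
        have hsplitC : composeR cyrPairs (c :: t)
            = composeR bs (repPass p.1 p.2 (composeR as (c :: t))) := by
          rw [hsplit, composeR_append]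
          simp [composeR, List.foldl_cons]
        rcases key_len hpc with h1 | h2
        · -- single-letter key [c]
          obtain ⟨a, ha⟩ := List.length_eq_one_iff.mp h1
          rw [ha, List.cons_prefix_cons] at hppre
          rw [hppre.1] at ha
          have hskipas : composeR as (c :: t) = c :: composeR as t :=
            compose_skip as hasmem c t haspre
          have hrep : repPass p.1 p.2 (c :: composeR as t)
              = w :: repPass p.1 p.2 (composeR as t) := by
            rw [repPass, if_pos (by rw [ha]; simp [List.isPrefixOf]), ha, hw]
            simp
          have hIH : composeR cyrPairs t = ascScan t :=
            ih t (by simpa using Nat.lt_succ_iff.mp (by simpa using hs))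
          calc composeR cyrPairs (c :: t)
              = composeR bs (repPass p.1 p.2 (c :: composeR as t)) := by
                rw [hsplitC, hskipas]
            _ = composeR bs (w :: repPass p.1 p.2 (composeR as t)) := by rw [hrep]
            _ = w :: composeR bs (repPass p.1 p.2 (composeR as t)) :=
                compose_skip_val bs hbsmem w hwval _
            _ = w :: composeR cyrPairs t := by
                rw [hsplit, composeR_append]; simp [composeR, List.foldl_cons]
            _ = w :: ascScan t := by rw [hIH]
            _ = ascScan (c :: t) := by rw [ascScan_cons, hf]; simp [ha, hw]
        · -- digraph key [c, b]
          obtain ⟨a, b, hab⟩ := List.length_eq_two.mp h2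
          rw [hab, List.cons_prefix_cons] at hppre
          rw [hppre.1] at hab
          have hbpre := hppre.2
          obtain ⟨t', rfl⟩ : ∃ t', t = b :: t' := by
            cases t with
            | nil => simp at hbpre
            | cons t0 t'' =>
              rw [List.cons_prefix_cons] at hbpre
              exact ⟨t'', by rw [hbpre.1]⟩
          have hasnosnd : ∀ q ∈ as, ¬ q.1 <+: (b :: t') := by
            intro q hq hpre
            have hqc := hasmem q hq
            obtain ⟨e, r, he⟩ : ∃ e r, q.1 = e :: r := by
              cases hkey : q.1 with
              | nil => exact absurd hkey (key_ne_nil hqc)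
              | cons e r => exact ⟨e, r, rfl⟩
            rw [he, List.cons_prefix_cons] at hpre
            have hhead := key_head_not_snd hqc he
            have hsnd := key_snd_snd hpc hab
            rw [hpre.1] at hhead
            rw [hhead] at hsnd
            simp at hsnd
          have hskipas : composeR as (c :: b :: t') = c :: b :: composeR as t' := by
            rw [compose_skip as hasmem c (b :: t') haspre,
              compose_skip as hasmem b t' hasnosnd]
          have hrep : repPass p.1 p.2 (c :: b :: composeR as t')
              = w :: repPass p.1 p.2 (composeR as t') := by
            rw [repPass, if_pos (by rw [hab]; simp [List.isPrefixOf]), hab, hw]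
            simp
          have hIH : composeR cyrPairs t' = ascScan t' := by
            apply ih t'
            simp only [List.length_cons] at hs
            omega
          calc composeR cyrPairs (c :: b :: t')
              = composeR bs (repPass p.1 p.2 (c :: b :: composeR as t')) := by
                rw [hsplitC, hskipas]
            _ = composeR bs (w :: repPass p.1 p.2 (composeR as t')) := by rw [hrep]
            _ = w :: composeR bs (repPass p.1 p.2 (composeR as t')) :=
                compose_skip_val bs hbsmem w hwval _
            _ = w :: composeR cyrPairs t' := by
                rw [hsplit, composeR_append]; simp [composeR, List.foldl_cons]
            _ = w :: ascScan t' := by rw [hIH]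
            _ = ascScan (c :: b :: t') := by rw [ascScan_cons, hf]; simp [hab, hw]

-- ===== A-side normalization: the dict/keys/getD fold is the char-level composition =====

lemma getD_vals : (ascDicPairs.all fun p => ascDic.getD p.1 "" == p.2) = true := by rfl

lemma strfold : ∀ (ps : List (String × String)) (t : String),
    ps.foldl (fun s p => PySem.Str.replace s p.1 p.2) t
      = String.ofList ((ps.map (fun p => (p.1.toList, p.2.toList))).foldl
          (fun s p => PySem.Chars.replace s p.1 p.2) t.toList) := by
  intro ps
  induction ps with
  | nil => intro t; simp [String.ofList_toList]
  | cons p ps ih =>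
    intro t
    rw [List.foldl_cons, ih, List.map_cons, List.foldl_cons]
    congr 1
    simp

lemma composeC_eq (ks : List (List Char × List Char)) (hks : ∀ p ∈ ks, p.1 ≠ []) :
    ∀ s, ks.foldl (fun t p => PySem.Chars.replace t p.1 p.2) s = composeR ks s := by
  induction ks with
  | nil => intro s; rfl
  | cons p ks ih =>
    intro s
    rw [List.foldl_cons, replace_eq_rep s p.1 p.2 (hks p (by simp))]
    exact ih (fun q hq => hks q (by simp [hq])) (repPass p.1 p.2 s)

lemma map_pairs : ascDicPairs.map (fun p => (p.1.toList, p.2.toList)) = cyrPairs := by rfl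

lemma A_norm (text : String) : asc_to_cyr text = String.ofList (composeR cyrPairs text.toList) := by
  rw [asc_to_cyr]
  have hk : ascDic.keys = ascDicPairs.map Prod.fst := by simp [ascDic]
  rw [hk, List.foldl_map]
  have hfun : ascDicPairs.foldl (fun t p => PySem.Str.replace t p.1 (ascDic.getD p.1 "")) text
      = ascDicPairs.foldl (fun t p => PySem.Str.replace t p.1 p.2) text := by
    apply PySem.List.foldl_congr_mem
    intro acc p hp
    have := List.all_eq_true.mp getD_vals p hp
    rw [beq_iff_eq] at this
    rw [this]
  rw [hfun, strfold, map_pairs, composeC_eq cyrPairs (fun p hp => key_ne_nil hp)]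

-- ===== VERDICT (by name: the statement is the Claim_ definition above) =====
theorem asc_to_cyr_spec : Claim_equal_asc_to_cyr := by
  intro text _
  unfold Spec_asc_to_cyr asc_to_cyr_alt
  rw [A_norm, compose_eq_scan text.toList.length text.toList le_rfl]
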